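-- pv_equiv track=rewrite | github.com/Dejetins/roehub.com | tools/docs/generate_docs_index.py | extract_title_and_description
-- ===== SOURCE A (Python) =====
-- def extract_title_and_description(markdown_text: str, fallback_title: str) -> tuple[str, str]:
--     """
--     Extract document title and one-line description from markdown content.
--
--     Parameters:
--     - markdown_text: full markdown file content.
--     - fallback_title: title used when first `# H1` line is absent.
--
--     Returns:
--     - Tuple `(title, description)`:
--       - `title`: first `# H1` value or fallback.
--       - `description`: first non-empty non-heading text line after H1, otherwise empty string.
--
--     Key assumptions / invariants:
--     - Only the first `# H1` is treated as canonical title.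
--     - Description is a single line and keeps original wording.
--
--     Errors / exceptions:
--     - No exceptions are expected for string input.
--
--     Side effects:
--     - None.
--
--     Related docs and files:
--     - `docs/architecture/README.md`
--     - `tests/unit/tools/test_generate_docs_index.py`
--     """
--
--     lines = markdown_text.splitlines()
--     title = fallback_title
--     h1_index: int | None = None
--
--     for index, line in enumerate(lines):
--         stripped = line.strip()
--         if stripped.startswith("# "):
--             candidate_title = stripped[2:].strip()
--             if candidate_title:
--                 title = candidate_title
--             h1_index = index
--             break
--
--     if h1_index is None:
--         return title, ""
--
--     for line in lines[h1_index + 1 :]: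
--         stripped = line.strip()
--         if not stripped:
--             continue
--         if stripped.startswith("#"):
--             continue
--         if stripped.startswith("```"):
--             continue
--         return title, stripped
--
--     return title, ""
-- ===== SOURCE B (Python) =====
-- def extract_title_and_description(markdown_text: str, fallback_title: str) -> tuple[str, str]:
--     """Single right-to-left fold: scanning the lines backwards, keep the first
--     acceptable description line of the suffix seen so far, and overwrite the
--     H1 record so the leftmost '# ' line wins; no index, no slice, no forward scan."""
--     h1 = None   # (candidate_title, description) for leftmost '# ' line so far
--     desc = ''   # first acceptable description line of the suffix processed so far
--     for line in reversed(markdown_text.splitlines()):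
--         s = line.strip()
--         if s.startswith('# '):
--             h1 = (s[2:].strip(), desc)
--         elif s and not s.startswith('#') and not s.startswith('```'):
--             desc = s
--     if h1 is None:
--         return fallback_title, ''
--     cand, d = h1
--     return (cand if cand else fallback_title), d
-- ===== Notes on version B (the rewrite author's own statement) =====
-- stated objective: alternative
-- what changed: Replaced the forward find-H1-then-scan-the-tail structure by a single right-to-left fold over the lines that keeps the first acceptable description of the suffix seen so far and overwrites the H1 record so the leftmost '# ' heading wins; no index, no slice, no forward scan.
import Mathlib
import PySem

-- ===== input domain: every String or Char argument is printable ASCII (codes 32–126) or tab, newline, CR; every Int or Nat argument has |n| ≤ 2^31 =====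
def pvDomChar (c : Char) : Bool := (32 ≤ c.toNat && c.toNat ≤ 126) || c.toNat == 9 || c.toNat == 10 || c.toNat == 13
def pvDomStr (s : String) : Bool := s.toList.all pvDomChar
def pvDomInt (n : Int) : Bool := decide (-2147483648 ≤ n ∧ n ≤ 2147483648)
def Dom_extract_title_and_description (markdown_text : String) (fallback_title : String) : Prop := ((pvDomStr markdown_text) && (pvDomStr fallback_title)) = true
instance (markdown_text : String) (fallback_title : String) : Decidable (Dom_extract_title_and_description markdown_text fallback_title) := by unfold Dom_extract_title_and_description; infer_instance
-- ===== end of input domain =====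

-- B replaces A's forward find-H1-then-scan-the-tail structure by one right-to-left fold
-- over the lines (leftmost H1 wins by overwriting); objective: alternative algorithm.

-- ===== PORT A =====
-- second loop of A: scan the lines after the H1 for the first description line
def pvA_desc (title : String) : List String → String × String
  | [] => (title, "")
  | line :: rest =>
    let stripped := PySem.Str.strip line
    if stripped = "" then pvA_desc title rest
    else if PySem.Str.startswith stripped "#" then pvA_desc title rest
    else if PySem.Str.startswith stripped "```" then pvA_desc title rest
    else (title, stripped)

-- first loop of A: find the first '# ' line; 'rest' is lines[h1_index+1:]
def pvA_find (title : String) : List String → String × String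
  | [] => (title, "")
  | line :: rest =>
    let stripped := PySem.Str.strip line
    if PySem.Str.startswith stripped "# " then
      let candidate := PySem.Str.strip (PySem.Str.slice stripped (some 2) none)
      let title' := if candidate ≠ "" then candidate else title
      pvA_desc title' rest
    else pvA_find title rest

def extract_title_and_description (markdown_text : String) (fallback_title : String) : String × String :=
  pvA_find fallback_title (PySem.Str.splitlines markdown_text)

-- ===== PORT B =====
-- one step of B's backward fold; acc = (h1, desc)
def pvB_step (acc : Option (String × String) × String) (line : String) : Option (String × String) × String :=
  let s := PySem.Str.strip line
  if PySem.Str.startswith s "# " then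
    (some (PySem.Str.strip (PySem.Str.slice s (some 2) none), acc.2), acc.2)
  else if s ≠ "" ∧ ¬ PySem.Str.startswith s "#" ∧ ¬ PySem.Str.startswith s "```" then
    (acc.1, s)
  else acc

def extract_title_and_description_alt (markdown_text : String) (fallback_title : String) : String × String :=
  let r := ((PySem.Str.splitlines markdown_text).reverse).foldl pvB_step (none, "")
  match r.1 with
  | none => (fallback_title, "")
  | some (cand, d) => (if cand ≠ "" then cand else fallback_title, d)

-- ===== PRECONDITION & SPEC =====
def Spec_extract_title_and_description (markdown_text : String) (fallback_title : String) (out : String × String) : Prop := out = extract_title_and_description_alt markdown_text fallback_title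
instance (markdown_text : String) (fallback_title : String) (out : String × String) : Decidable (Spec_extract_title_and_description markdown_text fallback_title out) := by unfold Spec_extract_title_and_description; infer_instance

-- ===== CLAIM (what is proved, stated in full; the proofs are below) =====
def Claim_equal_extract_title_and_description : Prop := ∀ (markdown_text : String) (fallback_title : String), Dom_extract_title_and_description markdown_text fallback_title → Spec_extract_title_and_description markdown_text fallback_title (extract_title_and_description markdown_text fallback_title)

-- ===== LEMMAS AND PROOFS =====
-- the backward foldl over the reversed list is the foldr of pvB_step's flip
def pvB_fold (ls : List String) : Option (String × String) × String :=
  List.foldr (fun l a => pvB_step a l) (none, "") ls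

theorem pvB_fold_eq (ls : List String) :
    ls.reverse.foldl pvB_step (none, "") = pvB_fold ls := by
  simp [pvB_fold, List.foldl_reverse]

-- the desc component of the fold is exactly A's second loop's result
theorem pv_sw_hash (s : List Char)
    (h : PySem.Chars.startswith s ['#', ' '] = true) : PySem.Chars.startswith s ['#'] = true := by
  rw [PySem.Chars.startswith_iff] at *
  exact List.IsPrefix.trans ⟨[' '], rfl⟩ h

theorem pvA_desc_eq_fold (t : String) (ls : List String) :
    pvA_desc t ls = (t, (pvB_fold ls).2) := by
  induction ls with
  | nil => rfl
  | cons l rest ih =>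
    have hs := pv_sw_hash (PySem.Chars.strip l.toList)
    simp only [pvA_desc, pvB_fold, List.foldr_cons, pvB_step]
    split_ifs <;> simp_all [pvB_fold, pvB_step]

-- A's first loop equals the interpretation of the fold's h1 component
theorem pvA_find_eq_fold (t : String) (ls : List String) :
    pvA_find t ls =
      (match (pvB_fold ls).1 with
       | none => (t, "")
       | some (cand, d) => (if cand ≠ "" then cand else t, d)) := by
  induction ls generalizing t with
  | nil => rfl
  | cons l rest ih =>
    have hs := pv_sw_hash (PySem.Chars.strip l.toList)
    simp only [pvA_find, pvB_fold, List.foldr_cons, pvB_step]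
    split_ifs <;> simp_all [pvB_fold, pvA_desc_eq_fold, pvB_step]

-- ===== VERDICT (by name: the statement is the Claim_ definition above) =====
theorem extract_title_and_description_spec : Claim_equal_extract_title_and_description := by
  intro md fb _
  unfold Spec_extract_title_and_description extract_title_and_description extract_title_and_description_alt
  rw [pvB_fold_eq, pvA_find_eq_fold]
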